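-- pv_equiv track=rewrite | github.com/davweb/adventofcode2017 | 2018/day1.py | find_repeat
-- ===== SOURCE A (Python) =====
-- import collections
-- import itertools
--
-- def find_repeat(data):
--     """You notice that the device repeats the same frequency change list over and
--     over. To calibrate the device, you need to find the first frequency it
--     reaches twice.
--
--     >>> find_repeat([+1, -1])
--     0
--     >>> find_repeat([+3, +3, +4, -2, -4])
--     10
--     >>> find_repeat([-6, +3, +8, +5, -6])
--     5
--     >>> find_repeat([+7, +7, -2, -7, -4])
--     14
--     """
--
--     count = collections.defaultdict(int)
--     value = 0
--
--     for increment in itertools.cycle(data):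
--         count[value] += 1
--
--         if count[value] == 2:
--             return value
--
--         value += increment
-- ===== SOURCE B (Python) =====
-- def find_repeat(data):
--     """Analytic solution: the stream of values is prefix[t % n] + (t // n) * total,
--     so the first value reached twice comes from a pair of prefix sums that are
--     congruent modulo the total; no simulation of cycles."""
--     n = len(data)
--     prefix = []
--     value = 0
--     for x in data:
--         prefix.append(value)
--         value += x
--     total = value
--
--     def candidate(j, i):
--         # (time, value) at which the value prefix[j] is reached a second time
--         # through position i of a later cycle (or through i < j of cycle 0).
--         if i < j and prefix[i] == prefix[j]:
--             return (j, prefix[j])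
--         if total != 0 and (prefix[j] - prefix[i]) % total == 0:
--             g = (prefix[j] - prefix[i]) // total
--             if g >= 1:
--                 return (g * n + i, prefix[j])
--         return None
--
--     best = None
--     for j in range(n):
--         for i in range(n):
--             cand = candidate(j, i)
--             if cand is not None and (best is None or cand < best):
--                 best = cand
--     return best[1] if best is not None else 0
-- ===== Notes on version B (the rewrite author's own statement) =====
-- stated objective: alternative
-- what changed: B replaces the unbounded cycle-by-cycle simulation with an analytic computation: it builds the n prefix sums once and finds the earliest revisit time directly from pairs of prefix sums congruent modulo the list total, so no cycle of the input is ever replayed.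
-- outside the precondition, e.g. on find_repeat([]): A returns None, B returns 0; on find_repeat([1]): A does not finish within the time limit, B returns 0
import Mathlib
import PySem

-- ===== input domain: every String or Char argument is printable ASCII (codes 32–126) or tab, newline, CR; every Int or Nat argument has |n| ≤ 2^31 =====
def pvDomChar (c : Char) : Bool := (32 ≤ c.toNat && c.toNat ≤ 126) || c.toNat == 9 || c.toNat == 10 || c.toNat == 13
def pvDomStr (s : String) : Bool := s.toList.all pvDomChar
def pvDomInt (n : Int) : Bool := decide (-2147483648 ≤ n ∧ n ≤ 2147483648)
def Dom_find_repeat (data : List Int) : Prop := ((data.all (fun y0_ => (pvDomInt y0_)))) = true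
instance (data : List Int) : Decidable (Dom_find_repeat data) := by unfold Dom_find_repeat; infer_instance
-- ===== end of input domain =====

-- B replaces A's unbounded cycle-by-cycle simulation by an analytic search over pairs of
-- prefix sums congruent modulo the list total: a different algorithm that never replays a cycle.


-- ===== PORT A =====
-- `itertools.cycle(data)` is ported as indexing `data.getD (step % n) 0`, exact for nonempty data
-- (the index is always in range).  The fuel argument is only a totality guard: under Pre_ the
-- loop returns before the fuel runs out (proved below); Python's loop has no such counter.
def findRepeatLoop (data : List Int) (n : Nat) : Nat → Nat → PySem.Dict Int Int → Int → Int
  | 0, _, _, _ => 0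
  | fuel+1, step, count, value =>
    let c := count.getD value 0 + 1
    let count' := count.insert value c
    if c = 2 then value
    else findRepeatLoop data n fuel (step+1) count' (value + data.getD (step % n) 0)

def find_repeat (data : List Int) : Int :=
  let n := data.length
  findRepeatLoop data n (n * (2 * (data.map Int.natAbs).sum + 2)) 0 PySem.Dict.empty 0

-- ===== PORT B =====
-- helper `candidate(j, i)` of Source B
def findRepeatCand (pre : List Int) (total : Int) (n : Nat) (j i : Nat) : Option (Int × Int) :=
  if i < j ∧ pre.getD i 0 = pre.getD j 0 then some ((j : Int), pre.getD j 0)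
  else if total ≠ 0 ∧ PySem.Int.mod (pre.getD j 0 - pre.getD i 0) total = 0 then
    let g := PySem.Int.floordiv (pre.getD j 0 - pre.getD i 0) total
    if 1 ≤ g then some (g * (n : Int) + (i : Int), pre.getD j 0) else none
  else none

-- `if cand is not None and (best is None or cand < best): best = cand`  (tuple `<` is lexicographic)
def findRepeatBest (best : Option (Int × Int)) (cand : Option (Int × Int)) : Option (Int × Int) :=
  match cand with
  | none => best
  | some c =>
    match best with
    | none => some c
    | some b => if c.1 < b.1 ∨ (c.1 = b.1 ∧ c.2 < b.2) then some c else some b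

def find_repeat_alt (data : List Int) : Int :=
  let n := data.length
  let pt := data.foldl (fun (a : List Int × Int) x => (a.1 ++ [a.2], a.2 + x)) (([] : List Int), (0 : Int))
  let best := (List.range n).foldl
    (fun best j => (List.range n).foldl
      (fun best i => findRepeatBest best (findRepeatCand pt.1 pt.2 n j i)) best) none
  match best with
  | some b => b.2
  | none => 0

-- ===== PRECONDITION & SPEC =====
-- Pre_ excludes the empty list, on which A returns None (not an int), and the inputs whose
-- cumulative frequency never repeats — total ≠ 0 with no two prefix sums congruent modulo the
-- total — on which A loops forever.
def Pre_find_repeat (data : List Int) : Prop :=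
  data ≠ [] ∧ (data.sum = 0 ∨ ∃ i < data.length, ∃ j < data.length,
    i ≠ j ∧ ((data.take j).sum - (data.take i).sum) % data.sum = 0)
instance (data : List Int) : Decidable (Pre_find_repeat data) := by
  unfold Pre_find_repeat; infer_instance

def pvWitness_find_repeat : List Int := [1, -1]

def Spec_find_repeat (data : List Int) (out : Int) : Prop := out = find_repeat_alt data
instance (data : List Int) (out : Int) : Decidable (Spec_find_repeat data out) := by
  unfold Spec_find_repeat; infer_instance

-- ===== CLAIM (what is proved, stated in full; the proofs are below) =====
def Claim_equal_find_repeat : Prop :=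
  ∀ (data : List Int), Dom_find_repeat data → Pre_find_repeat data →
    Spec_find_repeat data (find_repeat data)

-- ===== LEMMAS AND PROOFS =====

-- i-th prefix sum of the data (the value at position i of cycle 0)
def pfx (data : List Int) (i : Nat) : Int := (data.take i).sum

-- the value the device holds at step t of the infinite stream
def seqV (data : List Int) (t : Nat) : Int :=
  pfx data (t % data.length) + ((t / data.length : Nat) : Int) * data.sum

def ltPair (c b : Int × Int) : Prop := c.1 < b.1 ∨ (c.1 = b.1 ∧ c.2 < b.2)

-- zeta-free unfolding equations for the ports (plain `rfl`s)
lemma a_eq (data : List Int) :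
    find_repeat data = findRepeatLoop data data.length
      (data.length * (2 * (data.map Int.natAbs).sum + 2)) 0 PySem.Dict.empty 0 := rfl

lemma loop_succ (data : List Int) (n fuel step : Nat) (cnt : PySem.Dict Int Int) (value : Int) :
    findRepeatLoop data n (fuel+1) step cnt value =
      if cnt.getD value 0 + 1 = 2 then value
      else findRepeatLoop data n fuel (step+1) (cnt.insert value (cnt.getD value 0 + 1))
        (value + data.getD (step % n) 0) := rfl

lemma cand_eq (pre : List Int) (total : Int) (n j i : Nat) :
    findRepeatCand pre total n j i =
      (if i < j ∧ pre.getD i 0 = pre.getD j 0 then some ((j : Int), pre.getD j 0)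
       else if total ≠ 0 ∧ PySem.Int.mod (pre.getD j 0 - pre.getD i 0) total = 0 then
         (if 1 ≤ PySem.Int.floordiv (pre.getD j 0 - pre.getD i 0) total then
            some (PySem.Int.floordiv (pre.getD j 0 - pre.getD i 0) total * (n : Int) + (i : Int),
              pre.getD j 0)
          else none)
       else none) := rfl

lemma bestR_none (b : Option (Int × Int)) : findRepeatBest b none = b := rfl
lemma bestR_none_some (c : Int × Int) : findRepeatBest none (some c) = some c := rfl
lemma bestR_some_some (b c : Int × Int) :
    findRepeatBest (some b) (some c) =
      if c.1 < b.1 ∨ (c.1 = b.1 ∧ c.2 < b.2) then some c else some b := rfl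

lemma alt_eq (data : List Int) : find_repeat_alt data =
    (match (List.range data.length).foldl
      (fun best j => (List.range data.length).foldl
        (fun best i => findRepeatBest best (findRepeatCand
          (data.foldl (fun (a : List Int × Int) x => (a.1 ++ [a.2], a.2 + x)) (([] : List Int), (0 : Int))).1
          (data.foldl (fun (a : List Int × Int) x => (a.1 ++ [a.2], a.2 + x)) (([] : List Int), (0 : Int))).2
          data.length j i)) best) none with
    | some b => b.2
    | none => 0) := rfl

lemma pfx_zero (data : List Int) : pfx data 0 = 0 := rfl

lemma pfx_succ (data : List Int) (i : Nat) (h : i < data.length) :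
    pfx data (i+1) = pfx data i + data.getD i 0 := by
  simp [pfx, List.sum_take_succ data i h, h]

lemma pfx_len (data : List Int) : pfx data data.length = data.sum := by
  simp [pfx]

lemma seqV_zero (data : List Int) : seqV data 0 = 0 := by
  simp [seqV, pfx]

lemma seqV_small (data : List Int) (t : Nat) (h : t < data.length) :
    seqV data t = pfx data t := by
  simp [seqV, Nat.mod_eq_of_lt h, Nat.div_eq_of_lt h]

lemma seqV_block (data : List Int) (hl : 0 < data.length) (g i : Nat) (hi : i < data.length) :
    seqV data (g * data.length + i) = pfx data i + (g : Int) * data.sum := by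
  have h1 : (g * data.length + i) % data.length = i := by
    rw [add_comm, Nat.add_mul_mod_self_right, Nat.mod_eq_of_lt hi]
  have h2 : (g * data.length + i) / data.length = g := by
    rw [add_comm, Nat.add_mul_div_right _ _ hl, Nat.div_eq_of_lt hi]
    omega
  simp [seqV, h1, h2]

lemma seqV_succ (data : List Int) (hn : data ≠ []) (t : Nat) :
    seqV data (t+1) = seqV data t + data.getD (t % data.length) 0 := by
  have hl : 0 < data.length := List.length_pos_iff.mpr hn
  have hr : t % data.length < data.length := Nat.mod_lt _ hl
  have ht : t / data.length * data.length + t % data.length = t := by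
    rw [mul_comm]; exact Nat.div_add_mod t data.length
  have hseqt := seqV_block data hl (t / data.length) (t % data.length) hr
  rw [ht] at hseqt
  rcases Nat.lt_or_ge (t % data.length + 1) data.length with hc | hc
  · have h1 : t + 1 = t / data.length * data.length + (t % data.length + 1) := by omega
    rw [h1, seqV_block data hl _ _ hc, pfx_succ data _ hr, hseqt]
    ring
  · have hceq : t % data.length + 1 = data.length := by omega
    have h1 : t + 1 = (t / data.length + 1) * data.length + 0 := by
      have h2 : (t / data.length + 1) * data.length
          = t / data.length * data.length + data.length := by ring
      omega
    have hx : pfx data (t % data.length) + data.getD (t % data.length) 0 = data.sum := by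
      have h2 := pfx_succ data (t % data.length) hr
      rw [hceq, pfx_len] at h2
      linarith
    rw [h1, seqV_block data hl _ _ hl, hseqt, pfx_zero]
    push_cast
    linarith

lemma seqV_add_len (data : List Int) (hn : data ≠ []) (t : Nat) :
    seqV data (t + data.length) = seqV data t + data.sum := by
  have hl : 0 < data.length := List.length_pos_iff.mpr hn
  have h1 : (t + data.length) % data.length = t % data.length := Nat.add_mod_right t _
  have h2 : (t + data.length) / data.length = t / data.length + 1 := Nat.add_div_right t hl
  simp [seqV, h1, h2]
  ring

lemma sum_natAbs_le (l : List Int) : l.sum.natAbs ≤ (l.map Int.natAbs).sum := by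
  induction l with
  | nil => simp
  | cons x l ih =>
    simp only [List.sum_cons, List.map_cons]
    calc (x + l.sum).natAbs ≤ x.natAbs + l.sum.natAbs := Int.natAbs_add_le _ _
      _ ≤ x.natAbs + (l.map Int.natAbs).sum := by omega

lemma sum_take_le (L : List Nat) (i : Nat) : (L.take i).sum ≤ L.sum := by
  conv_rhs => rw [← List.take_append_drop i L]
  rw [List.sum_append]
  omega

lemma pfx_natAbs_le (data : List Int) (i : Nat) :
    (pfx data i).natAbs ≤ (data.map Int.natAbs).sum := by
  calc (pfx data i).natAbs ≤ ((data.take i).map Int.natAbs).sum := sum_natAbs_le _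
    _ = ((data.map Int.natAbs).take i).sum := by rw [List.map_take]
    _ ≤ (data.map Int.natAbs).sum := sum_take_le _ _

-- the prefix-building loop of Source B
lemma prefixFold (l : List Int) : ∀ (acc : List Int) (v : Int),
    l.foldl (fun (a : List Int × Int) x => (a.1 ++ [a.2], a.2 + x)) (acc, v)
      = (acc ++ (List.range l.length).map (fun i => v + (l.take i).sum), v + l.sum) := by
  induction l with
  | nil => intro acc v; simp
  | cons x l ih =>
    intro acc v
    simp only [List.foldl_cons, ih, List.length_cons, List.sum_cons, Prod.mk.injEq]
    refine ⟨?_, by ring⟩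
    rw [List.range_succ_eq_map, List.map_cons, List.map_map]
    simp [Function.comp_def, List.take_succ_cons, add_assoc]

lemma pt_eq (data : List Int) :
    data.foldl (fun (a : List Int × Int) x => (a.1 ++ [a.2], a.2 + x)) (([] : List Int), (0 : Int))
      = ((List.range data.length).map (pfx data), data.sum) := by
  rw [prefixFold]
  simp [pfx]

lemma ltPair_trans {a b c : Int × Int} (h1 : ltPair a b) (h2 : ltPair b c) : ltPair a c := by
  obtain ⟨a1, a2⟩ := a; obtain ⟨b1, b2⟩ := b; obtain ⟨c1, c2⟩ := c
  unfold ltPair at *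
  simp only at *
  omega

lemma ltPair_resolve {c b : Int × Int} (h : ¬ ltPair c b) : b = c ∨ ltPair b c := by
  obtain ⟨c1, c2⟩ := c; obtain ⟨b1, b2⟩ := b
  unfold ltPair at *
  simp only [Prod.mk.injEq] at *
  omega

lemma best_mono (L : List (Option (Int × Int))) : ∀ (m : Int × Int),
    ∃ m', L.foldl findRepeatBest (some m) = some m' ∧ (m' = m ∨ ltPair m' m) := by
  induction L with
  | nil => exact fun m => ⟨m, rfl, Or.inl rfl⟩
  | cons o L ih =>
    intro m
    cases o with
    | none =>
      rw [List.foldl_cons, bestR_none]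
      exact ih m
    | some c =>
      rw [List.foldl_cons, bestR_some_some]
      by_cases h : ltPair c m
      · rw [if_pos (show c.1 < m.1 ∨ (c.1 = m.1 ∧ c.2 < m.2) from h)]
        obtain ⟨m', hm', hrel⟩ := ih c
        refine ⟨m', hm', Or.inr ?_⟩
        rcases hrel with h1 | h1
        · exact h1 ▸ h
        · exact ltPair_trans h1 h
      · rw [if_neg (show ¬ (c.1 < m.1 ∨ (c.1 = m.1 ∧ c.2 < m.2)) from h)]
        exact ih m

lemma best_mem (L : List (Option (Int × Int))) : ∀ (b0 : Option (Int × Int)),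
    L.foldl findRepeatBest b0 = b0 ∨ ∃ c, some c ∈ L ∧ L.foldl findRepeatBest b0 = some c := by
  induction L with
  | nil => intro b0; exact Or.inl rfl
  | cons o L ih =>
    intro b0
    cases o with
    | none =>
      rw [List.foldl_cons, bestR_none]
      rcases ih b0 with h | ⟨c, hc, h⟩
      · exact Or.inl h
      · exact Or.inr ⟨c, List.mem_cons_of_mem _ hc, h⟩
    | some c =>
      rw [List.foldl_cons]
      cases b0 with
      | none =>
        rw [bestR_none_some]
        rcases ih (some c) with h | ⟨c', hc', h⟩
        · exact Or.inr ⟨c, List.mem_cons_self, h⟩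
        · exact Or.inr ⟨c', List.mem_cons_of_mem _ hc', h⟩
      | some b =>
        rw [bestR_some_some]
        split_ifs with hlt
        · rcases ih (some c) with h | ⟨c', hc', h⟩
          · exact Or.inr ⟨c, List.mem_cons_self, h⟩
          · exact Or.inr ⟨c', List.mem_cons_of_mem _ hc', h⟩
        · rcases ih (some b) with h | ⟨c', hc', h⟩
          · exact Or.inl h
          · exact Or.inr ⟨c', List.mem_cons_of_mem _ hc', h⟩

lemma best_le (L : List (Option (Int × Int))) : ∀ (b0 : Option (Int × Int)) (c : Int × Int),
    some c ∈ L → ∃ m, L.foldl findRepeatBest b0 = some m ∧ (m = c ∨ ltPair m c) := by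
  induction L with
  | nil => intro b0 c h; simp at h
  | cons o L ih =>
    intro b0 c hmem
    rcases List.mem_cons.mp hmem with h | h
    · subst h
      rw [List.foldl_cons]
      cases b0 with
      | none =>
        rw [bestR_none_some]
        exact best_mono L c
      | some b =>
        rw [bestR_some_some]
        split_ifs with hlt
        · exact best_mono L c
        · obtain ⟨m', hm', hrel⟩ := best_mono L b
          refine ⟨m', hm', ?_⟩
          have hbc : b = c ∨ ltPair b c := ltPair_resolve hlt
          rcases hrel with h1 | h1 <;> rcases hbc with h2 | h2
          · exact Or.inl (h1.trans h2)
          · exact Or.inr (h1 ▸ h2)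
          · exact Or.inr (h2 ▸ h1)
          · exact Or.inr (ltPair_trans h1 h2)
    · exact ih _ c h

-- soundness: every candidate names a genuine second-visit time and its value
lemma cand_sound (data : List Int) (hn : data ≠ []) (j i : Nat)
    (hj : j < data.length) (hi : i < data.length) (tI v : Int)
    (h : findRepeatCand ((List.range data.length).map (pfx data)) data.sum data.length j i
          = some (tI, v)) :
    ∃ t : Nat, tI = (t : Int) ∧ v = seqV data t ∧ (∃ t' < t, seqV data t' = seqV data t) ∧
      (t < data.length ∨ data.sum ≠ 0) := by
  have hl : 0 < data.length := List.length_pos_iff.mpr hn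
  rw [cand_eq, PySem.List.getD_map_range _ _ _ _ hi, PySem.List.getD_map_range _ _ _ _ hj] at h
  split_ifs at h with h1 h2 h3
  · -- in-cycle duplicate
    obtain ⟨hij, hpe⟩ := h1
    simp only [Option.some.injEq, Prod.mk.injEq] at h
    obtain ⟨hT, hV⟩ := h
    refine ⟨j, hT.symm, ?_, ⟨i, hij, ?_⟩, Or.inl hj⟩
    · rw [seqV_small data j hj]; exact hV.symm
    · rw [seqV_small data i hi, seqV_small data j hj, hpe]
  · -- cross-cycle pair
    obtain ⟨htot, hmod⟩ := h2
    have hgM : PySem.Int.floordiv (pfx data j - pfx data i) data.sum * data.sum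
        = pfx data j - pfx data i := by
      have h4 := PySem.Int.floordiv_mul_add_mod (pfx data j - pfx data i) data.sum
      rw [hmod, add_zero] at h4
      exact h4
    simp only [Option.some.injEq, Prod.mk.injEq] at h
    obtain ⟨hT, hV⟩ := h
    set g := PySem.Int.floordiv (pfx data j - pfx data i) data.sum with hgdef
    have hg0 : 0 ≤ g := le_trans (by norm_num) h3
    refine ⟨g.toNat * data.length + i, ?_, ?_, ⟨j, ?_, ?_⟩, Or.inr htot⟩
    · rw [← hT]; push_cast [Int.toNat_of_nonneg hg0]; ring
    · rw [seqV_block data hl _ _ hi, Int.toNat_of_nonneg hg0, ← hV]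
      linarith [hgM]
    · have h5 : 1 ≤ g.toNat := by omega
      have h6 : data.length ≤ g.toNat * data.length := Nat.le_mul_of_pos_left _ (by omega)
      omega
    · rw [seqV_small data j hj, seqV_block data hl _ _ hi, Int.toNat_of_nonneg hg0]
      linarith [hgM]

-- every witness of the FIRST repeat lies in cycle 0
lemma wit_lt (data : List Int) (hn : data ≠ []) (hex : ∃ t, ∃ t' < t, seqV data t' = seqV data t)
    (t1 : Nat) (ht1 : t1 < Nat.find hex) (heq : seqV data t1 = seqV data (Nat.find hex)) :
    t1 < data.length := by
  have hl : 0 < data.length := List.length_pos_iff.mpr hn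
  by_contra hge'
  have hge : data.length ≤ t1 := by omega
  have hTn : data.length ≤ Nat.find hex := le_trans hge (le_of_lt ht1)
  have h1 : seqV data t1 = seqV data (t1 - data.length) + data.sum := by
    have h := seqV_add_len data hn (t1 - data.length)
    rwa [Nat.sub_add_cancel hge] at h
  have h2 : seqV data (Nat.find hex) = seqV data (Nat.find hex - data.length) + data.sum := by
    have h := seqV_add_len data hn (Nat.find hex - data.length)
    rwa [Nat.sub_add_cancel hTn] at h
  have hrep : ∃ t' < Nat.find hex - data.length, seqV data t' = seqV data (Nat.find hex - data.length) :=
    ⟨t1 - data.length, by omega, by omega⟩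
  exact Nat.find_min hex (by omega) hrep

-- completeness: a candidate at exactly the first repeat time exists
lemma cand_complete (data : List Int) (hn : data ≠ []) (hex : ∃ t, ∃ t' < t, seqV data t' = seqV data t)
    (hside : Nat.find hex < data.length ∨ data.sum ≠ 0) :
    ∃ j < data.length, ∃ i < data.length,
      findRepeatCand ((List.range data.length).map (pfx data)) data.sum data.length j i
        = some ((Nat.find hex : Int), seqV data (Nat.find hex)) := by
  have hl : 0 < data.length := List.length_pos_iff.mpr hn
  obtain ⟨t1, ht1, heq⟩ := Nat.find_spec hex
  have ht1n : t1 < data.length := wit_lt data hn hex t1 ht1 heq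
  rcases Nat.lt_or_ge (Nat.find hex) data.length with hTn | hTn
  · refine ⟨Nat.find hex, hTn, t1, ht1n, ?_⟩
    rw [cand_eq, PySem.List.getD_map_range _ _ _ _ ht1n, PySem.List.getD_map_range _ _ _ _ hTn]
    have hpe : pfx data t1 = pfx data (Nat.find hex) := by
      rw [← seqV_small data t1 ht1n, ← seqV_small data (Nat.find hex) hTn]; exact heq
    rw [if_pos ⟨ht1, hpe⟩, seqV_small data (Nat.find hex) hTn]
  · have htot : data.sum ≠ 0 := by
      rcases hside with h | h
      · omega
      · exact h
    have hi2 : Nat.find hex % data.length < data.length := Nat.mod_lt _ hl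
    have hg1 : 1 ≤ Nat.find hex / data.length := (Nat.one_le_div_iff hl).mpr hTn
    have hseqT : seqV data (Nat.find hex)
        = pfx data (Nat.find hex % data.length)
          + ((Nat.find hex / data.length : Nat) : Int) * data.sum := rfl
    have heq' : pfx data t1 = pfx data (Nat.find hex % data.length)
        + ((Nat.find hex / data.length : Nat) : Int) * data.sum := by
      rw [← seqV_small data t1 ht1n, heq, hseqT]
    refine ⟨t1, ht1n, Nat.find hex % data.length, hi2, ?_⟩
    rw [cand_eq, PySem.List.getD_map_range _ _ _ _ hi2, PySem.List.getD_map_range _ _ _ _ ht1n]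
    have hgZ : ((Nat.find hex / data.length : Nat) : Int) ≠ 0 := by
      simp only [ne_eq, Nat.cast_eq_zero]
      omega
    have hne : ¬ (Nat.find hex % data.length < t1
        ∧ pfx data (Nat.find hex % data.length) = pfx data t1) := by
      rintro ⟨-, hpe⟩
      have hz : ((Nat.find hex / data.length : Nat) : Int) * data.sum = 0 := by linarith
      rcases mul_eq_zero.mp hz with h | h
      · exact hgZ h
      · exact htot h
    rw [if_neg hne]
    have hD : pfx data t1 - pfx data (Nat.find hex % data.length)
        = ((Nat.find hex / data.length : Nat) : Int) * data.sum := by linarith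
    have hmod : PySem.Int.mod
        (pfx data t1 - pfx data (Nat.find hex % data.length)) data.sum = 0 := by
      rw [PySem.Int.mod_eq_zero_iff_dvd, hD]
      exact dvd_mul_left _ _
    rw [if_pos ⟨htot, hmod⟩]
    have hgD : PySem.Int.floordiv
        (pfx data t1 - pfx data (Nat.find hex % data.length)) data.sum
        = ((Nat.find hex / data.length : Nat) : Int) := by
      have h4 := PySem.Int.floordiv_mul_add_mod
        (pfx data t1 - pfx data (Nat.find hex % data.length)) data.sum
      rw [hmod, add_zero] at h4
      exact mul_right_cancel₀ htot (h4.trans hD)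
    rw [hgD]
    rw [if_pos (show (1 : Int) ≤ ((Nat.find hex / data.length : Nat) : Int) by exact_mod_cast hg1)]
    have hTeq : ((Nat.find hex / data.length : Nat) : Int) * (data.length : Int)
        + ((Nat.find hex % data.length : Nat) : Int) = (Nat.find hex : Int) := by
      have h5 : data.length * (Nat.find hex / data.length) + Nat.find hex % data.length
          = Nat.find hex := Nat.div_add_mod _ _
      conv_rhs => rw [← h5]
      push_cast
      ring
    rw [hTeq, heq', ← hseqT]

-- a repeat time exists and fits under the fuel of the port of A
lemma rep_exists_small (data : List Int) (hpre : Pre_find_repeat data) :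
    ∃ t, (∃ t' < t, seqV data t' = seqV data t) ∧ t + 1 ≤ data.length * (2 * (data.map Int.natAbs).sum + 2) := by
  obtain ⟨hn, hcases⟩ := hpre
  have hl : 0 < data.length := List.length_pos_iff.mpr hn
  have hnM : data.length * (2 * (data.map Int.natAbs).sum + 2)
      = 2 * (data.map Int.natAbs).sum * data.length + 2 * data.length := by ring
  have dup_case : ∀ i j : Nat, i < data.length → j < data.length → i < j →
      pfx data i = pfx data j →
      ∃ t, (∃ t' < t, seqV data t' = seqV data t) ∧ t + 1 ≤ data.length * (2 * (data.map Int.natAbs).sum + 2) := by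
    intro i j hi hj hij hpe
    refine ⟨j, ⟨i, hij, ?_⟩, by rw [hnM]; omega⟩
    rw [seqV_small data i hi, seqV_small data j hj, hpe]
  have hvn : seqV data data.length = data.sum := by
    simp [seqV, Nat.mod_self, Nat.div_self hl, pfx]
  rcases hcases with htot | ⟨i, hi, j, hj, hij, hmod⟩
  · refine ⟨data.length, ⟨0, hl, ?_⟩, by rw [hnM]; omega⟩
    rw [seqV_zero, hvn, htot]
  · have hdvd : data.sum ∣ (pfx data j - pfx data i) := Int.dvd_of_emod_eq_zero hmod
    by_cases htot : data.sum = 0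
    · have hpe : pfx data i = pfx data j := by
        obtain ⟨d, hd⟩ := hdvd
        rw [htot, zero_mul] at hd
        omega
      rcases Nat.lt_or_ge i j with h | h
      · exact dup_case i j hi hj h hpe
      · exact dup_case j i hj hi (by omega) hpe.symm
    · obtain ⟨d, hd⟩ := hdvd
      have habs : d.natAbs ≤ 2 * (data.map Int.natAbs).sum := by
        have h1 : (pfx data j - pfx data i).natAbs ≤ (pfx data j).natAbs + (pfx data i).natAbs :=
          Int.natAbs_sub_le _ _
        have h2 : (pfx data j).natAbs ≤ (data.map Int.natAbs).sum := pfx_natAbs_le data j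
        have h3 : (pfx data i).natAbs ≤ (data.map Int.natAbs).sum := pfx_natAbs_le data i
        have h4 : (pfx data j - pfx data i).natAbs = data.sum.natAbs * d.natAbs := by
          rw [hd, Int.natAbs_mul]
        have h5 : 1 ≤ data.sum.natAbs := by
          rcases Nat.eq_zero_or_pos data.sum.natAbs with h | h
          · exact absurd (Int.natAbs_eq_zero.mp h) htot
          · exact h
        have h6 : d.natAbs ≤ data.sum.natAbs * d.natAbs := Nat.le_mul_of_pos_left _ h5
        omega
      have cross : ∀ a b : Nat, a < data.length → b < data.length →
          ∀ e : Int, 1 ≤ e → e.natAbs ≤ 2 * (data.map Int.natAbs).sum →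
          pfx data b = pfx data a + e * data.sum →
          ∃ t, (∃ t' < t, seqV data t' = seqV data t) ∧ t + 1 ≤ data.length * (2 * (data.map Int.natAbs).sum + 2) := by
        intro a b ha hb e he habs' hpe
        refine ⟨e.toNat * data.length + a, ⟨b, ?_, ?_⟩, ?_⟩
        · have h1 : data.length ≤ e.toNat * data.length :=
            Nat.le_mul_of_pos_left _ (by omega)
          omega
        · rw [seqV_small data b hb, seqV_block data hl _ _ ha,
            Int.toNat_of_nonneg (by omega : (0:Int) ≤ e), hpe]
        · have h1 : e.toNat * data.length ≤ 2 * (data.map Int.natAbs).sum * data.length :=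
            Nat.mul_le_mul_right data.length (by omega)
          rw [hnM]
          omega
      rcases lt_trichotomy d 0 with hdlt | hdeq | hdgt
      · refine cross j i hj hi (-d) (by omega) (by simpa using habs) ?_
        have h7 : (-d) * data.sum = -(data.sum * d) := by ring
        rw [h7, ← hd]
        ring
      · have hpe : pfx data i = pfx data j := by rw [hdeq, mul_zero] at hd; omega
        rcases Nat.lt_or_ge i j with h | h
        · exact dup_case i j hi hj h hpe
        · exact dup_case j i hj hi (by omega) hpe.symm
      · refine cross i j hi hj d hdgt ?_ ?_
        · exact habs
        · have h7 : d * data.sum = data.sum * d := by ring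
          rw [h7, ← hd]
          ring

-- the loop of A returns the value of the first repeat
lemma loopA (data : List Int) (hn : data ≠ []) (hex : ∃ t, ∃ t' < t, seqV data t' = seqV data t) :
    ∀ (fuel s : Nat) (cnt : PySem.Dict Int Int), s ≤ Nat.find hex →
      Nat.find hex + 1 ≤ fuel + s →
      (∀ v : Int, cnt.getD v 0 = if (∃ t, t < s ∧ seqV data t = v) then (1 : Int) else 0) →
      findRepeatLoop data data.length fuel s cnt (seqV data s) = seqV data (Nat.find hex) := by
  intro fuel
  induction fuel with
  | zero => intro s cnt hs hfuel _; omega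
  | succ fuel ih =>
    intro s cnt hs hfuel hinv
    rw [loop_succ, hinv (seqV data s)]
    by_cases hsT : s = Nat.find hex
    · have hrep : ∃ t, t < s ∧ seqV data t = seqV data s := by
        rw [hsT]; exact Nat.find_spec hex
      rw [if_pos hrep, if_pos (by norm_num : (1 : Int) + 1 = 2), hsT]
    · have hslt : s < Nat.find hex := lt_of_le_of_ne hs hsT
      have hnorep : ¬ ∃ t, t < s ∧ seqV data t = seqV data s :=
        fun hrep => Nat.find_min hex hslt hrep
      rw [if_neg hnorep, if_neg (by norm_num : ¬ ((0 : Int) + 1 = 2)),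
        show (0 : Int) + 1 = 1 by norm_num, ← seqV_succ data hn s]
      refine ih (s+1) (cnt.insert (seqV data s) 1) (by omega) (by omega) ?_
      intro v
      rw [PySem.Dict.getD_insert]
      by_cases hv : v = seqV data s
      · rw [if_pos hv, if_pos ⟨s, Nat.lt_succ_self s, hv.symm⟩]
      · rw [if_neg hv, hinv v]
        have hiff : (∃ t, t < s ∧ seqV data t = v) ↔ (∃ t, t < s + 1 ∧ seqV data t = v) := by
          constructor
          · rintro ⟨t, ht, hte⟩; exact ⟨t, by omega, hte⟩
          · rintro ⟨t, ht, hte⟩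
            refine ⟨t, ?_, hte⟩
            rcases Nat.lt_or_ge t s with h | h
            · exact h
            · exfalso
              have hts : t = s := by omega
              exact hv (hts ▸ hte).symm
        simp only [hiff]

lemma altA (data : List Int) (hpre : Pre_find_repeat data) (hex : ∃ t, ∃ t' < t, seqV data t' = seqV data t)
    (hfuel : Nat.find hex + 1 ≤ data.length * (2 * (data.map Int.natAbs).sum + 2)) :
    find_repeat data = seqV data (Nat.find hex) := by
  have hn : data ≠ [] := hpre.1
  rw [a_eq data, show (0 : Int) = seqV data 0 from (seqV_zero data).symm]
  refine loopA data hn hex _ 0 PySem.Dict.empty (Nat.zero_le _) (by omega) ?_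
  intro v
  rw [PySem.Dict.getD_empty, if_neg (by rintro ⟨t, ht, -⟩; omega)]

lemma altB (data : List Int) (hpre : Pre_find_repeat data) (hex : ∃ t, ∃ t' < t, seqV data t' = seqV data t) :
    find_repeat_alt data = seqV data (Nat.find hex) := by
  have hn : data ≠ [] := hpre.1
  have hl : 0 < data.length := List.length_pos_iff.mpr hn
  rw [alt_eq data]
  simp only [pt_eq data]
  have harg : (List.range data.length).foldl
      (fun best j => (List.range data.length).foldl
        (fun best i => findRepeatBest best
          (findRepeatCand ((List.range data.length).map (pfx data)) data.sum data.length j i)) best)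
      none
      = ((List.range data.length).flatMap (fun j => (List.range data.length).map
          (fun i => findRepeatCand ((List.range data.length).map (pfx data)) data.sum data.length j i))).foldl
        findRepeatBest none := by
    rw [List.foldl_flatMap]
    simp only [List.foldl_map]
  rw [harg]
  set L := (List.range data.length).flatMap (fun j => (List.range data.length).map
    (fun i => findRepeatCand ((List.range data.length).map (pfx data)) data.sum data.length j i))
    with hLdef
  have hgk : ∀ k, k < data.length →
      ((List.range data.length).map (pfx data)).getD k 0 = pfx data k :=
    fun k hk => PySem.List.getD_map_range _ _ _ _ hk
  rcases best_mem L none with hres | ⟨c, hcmem, hres⟩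
  · -- no candidate at all: total must be 0 and the first repeated value is 0
    rw [hres]
    show (0 : Int) = seqV data (Nat.find hex)
    have hnone : ∀ j, j < data.length → ∀ i, i < data.length →
        findRepeatCand ((List.range data.length).map (pfx data)) data.sum data.length j i
          = none := by
      intro j hj i hi
      cases hc : findRepeatCand ((List.range data.length).map (pfx data)) data.sum data.length j i with
      | none => rfl
      | some c =>
        obtain ⟨m, hm, -⟩ := best_le L none c
          (by rw [hLdef]
              exact List.mem_flatMap.mpr ⟨j, List.mem_range.mpr hj,
                List.mem_map.mpr ⟨i, List.mem_range.mpr hi, hc⟩⟩)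
        rw [hres] at hm
        simp at hm
    have hinj : ∀ i, i < data.length → ∀ j, j < data.length → i < j →
        pfx data i ≠ pfx data j := by
      intro i hi j hj hij hpe
      have hc := hnone j hj i hi
      rw [cand_eq, hgk i hi, hgk j hj, if_pos ⟨hij, hpe⟩] at hc
      simp at hc
    have htot : data.sum = 0 := by
      by_contra htot
      have hcontra : ∀ a b : Nat, a < data.length → b < data.length → ∀ e : Int, 0 < e →
          pfx data b - pfx data a = data.sum * e → False := by
        intro a b ha hb e he hd'
        have hc := hnone b hb a ha
        rw [cand_eq, hgk a ha, hgk b hb] at hc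
        by_cases h1 : a < b ∧ pfx data a = pfx data b
        · rw [if_pos h1] at hc
          simp at hc
        · rw [if_neg h1] at hc
          have hmod' : PySem.Int.mod (pfx data b - pfx data a) data.sum = 0 :=
            (PySem.Int.mod_eq_zero_iff_dvd _ _).mpr ⟨e, hd'⟩
          rw [if_pos ⟨htot, hmod'⟩] at hc
          have hgD : PySem.Int.floordiv (pfx data b - pfx data a) data.sum = e := by
            have h4 := PySem.Int.floordiv_mul_add_mod (pfx data b - pfx data a) data.sum
            rw [hmod', add_zero] at h4
            have h5 : PySem.Int.floordiv (pfx data b - pfx data a) data.sum * data.sum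
                = e * data.sum := by
              rw [h4, hd']; ring
            exact mul_right_cancel₀ htot h5
          rw [hgD, if_pos (show (1 : Int) ≤ e by omega)] at hc
          simp at hc
      obtain ⟨-, hc2⟩ := hpre
      rcases hc2 with h | ⟨i, hi, j, hj, hij, hmod⟩
      · exact htot h
      · have hdvd : data.sum ∣ (pfx data j - pfx data i) := Int.dvd_of_emod_eq_zero hmod
        obtain ⟨d, hd⟩ := hdvd
        rcases lt_trichotomy d 0 with hdlt | hdeq | hdgt
        · refine hcontra j i hj hi (-d) (by omega) ?_
          rw [mul_neg, ← hd]
          ring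
        · have hpe : pfx data i = pfx data j := by rw [hdeq, mul_zero] at hd; omega
          rcases Nat.lt_or_ge i j with h | h
          · exact hinj i hi j hj h hpe
          · exact hinj j hj i hi (by omega) hpe.symm
        · exact hcontra i j hi hj d hdgt hd
    have hvn : seqV data data.length = data.sum := by
      simp [seqV, Nat.mod_self, Nat.div_self hl, pfx]
    have hrepn : ∃ t' < data.length, seqV data t' = seqV data data.length := ⟨0, hl, by rw [seqV_zero, hvn, htot]⟩
    have hTn : Nat.find hex ≤ data.length := Nat.find_min' hex hrepn
    have hTeq : Nat.find hex = data.length := by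
      rcases Nat.lt_or_ge (Nat.find hex) data.length with hlt | hge
      · obtain ⟨t1, ht1, heq⟩ := Nat.find_spec hex
        have ht1n : t1 < data.length := by omega
        rw [seqV_small data t1 ht1n, seqV_small data (Nat.find hex) hlt] at heq
        exact absurd heq (hinj t1 ht1n (Nat.find hex) hlt ht1)
      · omega
    rw [hTeq, hvn, htot]
  · -- a best candidate exists: it is exactly (T, seqV T)
    obtain ⟨c1, c2⟩ := c
    rw [hres]
    show c2 = seqV data (Nat.find hex)
    rw [hLdef] at hcmem
    obtain ⟨j, hjm, hmm⟩ := List.mem_flatMap.mp hcmem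
    obtain ⟨i, him, hcand⟩ := List.mem_map.mp hmm
    have hj : j < data.length := List.mem_range.mp hjm
    have hi : i < data.length := List.mem_range.mp him
    obtain ⟨t, htI, hv, hrep, hside⟩ := cand_sound data hn j i hj hi c1 c2 hcand
    have hTt : Nat.find hex ≤ t := Nat.find_min' hex hrep
    have hside' : Nat.find hex < data.length ∨ data.sum ≠ 0 := by
      rcases hside with h | h
      · exact Or.inl (by omega)
      · exact Or.inr h
    obtain ⟨j', hj', i', hi', hcand'⟩ := cand_complete data hn hex hside'
    have hmemT : some ((Nat.find hex : Int), seqV data (Nat.find hex)) ∈ L := by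
      rw [hLdef]
      exact List.mem_flatMap.mpr ⟨j', List.mem_range.mpr hj',
        List.mem_map.mpr ⟨i', List.mem_range.mpr hi', hcand'⟩⟩
    obtain ⟨m, hm, hrel⟩ := best_le L none _ hmemT
    rw [hres] at hm
    injection hm with hm
    rcases hrel with hrel | hrel
    · rw [← hm] at hrel
      exact ((Prod.mk.injEq _ _ _ _).mp hrel).2
    · exfalso
      rw [← hm] at hrel
      have h1 : c1 < (Nat.find hex : Int)
          ∨ (c1 = (Nat.find hex : Int) ∧ c2 < seqV data (Nat.find hex)) := hrel
      rcases h1 with h1 | ⟨h1, h2⟩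
      · rw [htI] at h1
        have : t < Nat.find hex := by exact_mod_cast h1
        omega
      · rw [htI] at h1
        have htT : t = Nat.find hex := by exact_mod_cast h1
        rw [hv, htT] at h2
        exact absurd h2 (lt_irrefl _)

-- ===== VERDICT (by name: the statement is the Claim_ definition above) =====
theorem find_repeat_spec : Claim_equal_find_repeat := by
  intro data _dom hpre
  unfold Spec_find_repeat
  obtain ⟨t0, hrep, hb⟩ := rep_exists_small data hpre
  have hex : ∃ t, ∃ t' < t, seqV data t' = seqV data t := ⟨t0, hrep⟩
  have hfuel : Nat.find hex + 1 ≤ data.length * (2 * (data.map Int.natAbs).sum + 2) := by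
    have := Nat.find_min' hex hrep
    omega
  rw [altA data hpre hex hfuel, altB data hpre hex]
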